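-- pv_equiv track=rewrite | github.com/eliottcassidy2000/math | 04-computation/allconflict_threshold_fast.py | has_hamcycle_subtournament
-- ===== SOURCE A (Python) =====
-- def has_hamcycle_subtournament(A, vertices):
--     """Check if subtournament on vertices has a directed Hamiltonian cycle.
--     Uses DP: dp[mask][v] = True if there's a path visiting vertices in mask ending at v.
--     Then check if last vertex connects back to first.
--     """
--     k = len(vertices)
--     if k < 3:
--         return False
--     if k % 2 == 0:
--         return False  # even cycles not counted
--
--     vlist = list(vertices)
--     # Build sub-adjacency
--     sub = [[0]*k for _ in range(k)]
--     for i in range(k):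
--         for j in range(k):
--             if i != j:
--                 sub[i][j] = A[vlist[i]][vlist[j]]
--
--     # DP over all subsets
--     full = (1 << k) - 1
--     # dp[mask][v] = can we have a path visiting exactly the vertices in mask, ending at v?
--     dp = [[False]*k for _ in range(1 << k)]
--     for v in range(k):
--         dp[1 << v][v] = True
--
--     for mask in range(1, 1 << k):
--         for v in range(k):
--             if not dp[mask][v]:
--                 continue
--             for u in range(k):
--                 if mask & (1 << u):
--                     continue
--                 if sub[v][u]:
--                     dp[mask | (1 << u)][u] = True
--
--     # Check for Hamiltonian cycle: path visiting all vertices ending at v, with edge v->start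
--     # Fix start = 0 (vertex 0 in the subset) to avoid counting rotations
--     for v in range(k):
--         if dp[full][v] and sub[v][0]:
--             return True
--     return False
-- ===== SOURCE B (Python) =====
-- def has_hamcycle_subtournament(A, vertices):
--     """Recursive backtracking: grow a directed path vertex by vertex (DFS with
--     short-circuit) instead of filling a 2^k x k DP table bottom-up."""
--     k = len(vertices)
--     if k < 3 or k % 2 == 0:
--         return False
--     vlist = list(vertices)
--
--     def edge(i, j):
--         return i != j and bool(A[vlist[i]][vlist[j]])
--
--     full = (1 << k) - 1
--
--     def extend(visited, last):
--         if visited == full: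
--             return edge(last, 0)
--         return any(edge(last, u) and extend(visited | (1 << u), u)
--                    for u in range(k) if not (visited >> u) & 1)
--
--     return any(extend(1 << v, v) for v in range(k))
-- ===== Notes on version B (the rewrite author's own statement) =====
-- stated objective: alternative
-- what changed: Replaces A's bottom-up Held-Karp subset-DP table (dp[mask][v] over all 2^k masks) by recursive backtracking that grows a directed path vertex by vertex with short-circuiting, keeping no table at all.
import Mathlib
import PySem

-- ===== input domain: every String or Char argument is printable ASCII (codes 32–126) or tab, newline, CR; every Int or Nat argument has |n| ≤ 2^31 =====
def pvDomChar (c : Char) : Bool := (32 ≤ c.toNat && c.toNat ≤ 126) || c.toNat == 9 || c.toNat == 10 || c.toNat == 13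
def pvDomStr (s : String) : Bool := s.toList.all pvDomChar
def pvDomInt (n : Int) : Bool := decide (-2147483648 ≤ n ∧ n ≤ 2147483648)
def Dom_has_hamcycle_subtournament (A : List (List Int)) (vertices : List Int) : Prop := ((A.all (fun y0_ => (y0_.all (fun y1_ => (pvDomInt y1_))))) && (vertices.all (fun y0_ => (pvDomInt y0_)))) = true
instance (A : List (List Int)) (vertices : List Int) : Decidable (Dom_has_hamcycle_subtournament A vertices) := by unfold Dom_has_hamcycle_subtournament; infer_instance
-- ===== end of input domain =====

-- B replaces A's bottom-up Held-Karp subset-DP table by recursive backtracking that grows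
-- a directed path vertex by vertex with short-circuit (objective: alternative structure).

-- ===== PORT A =====
-- A[vlist[i]][vlist[j]] (Python indexing, negative indices from the end); out-of-range
-- accesses raise IndexError in Python and are excluded by Pre_ below.
def pvRawEdge (A : List (List Int)) (vlist : List Int) (i j : Nat) : Int :=
  (PySem.List.pyGet? ((PySem.List.pyGet? A (vlist.getD i 0)).getD []) (vlist.getD j 0)).getD 0

def pvSub (A : List (List Int)) (vlist : List Int) (k : Nat) : List (List Int) :=
  (List.range k).map (fun i => (List.range k).map (fun j =>
    if i ≠ j then pvRawEdge A vlist i j else 0))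

-- body of A's innermost `for u in range(k)` loop
def pvAWrite (sub : List (List Int)) (mask v : Nat) (dp : List (List Bool)) (u : Nat) :
    List (List Bool) :=
  if mask &&& (1 <<< u) != 0 then dp
  else if (sub.getD v []).getD u 0 != 0 then
    dp.set (mask ||| (1 <<< u)) ((dp.getD (mask ||| (1 <<< u)) []).set u true)
  else dp

-- body of A's `for v in range(k)` loop (the `continue` guard, then the u-loop)
def pvAVisit (sub : List (List Int)) (k mask : Nat) (dp : List (List Bool)) (v : Nat) :
    List (List Bool) :=
  if !((dp.getD mask []).getD v false) then dp
  else (List.range k).foldl (pvAWrite sub mask v) dp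

def has_hamcycle_subtournament (A : List (List Int)) (vertices : List Int) : Bool :=
  let k := vertices.length
  if k < 3 then false
  else if k % 2 = 0 then false
  else
    let sub := pvSub A vertices k
    let dp0 : List (List Bool) := List.replicate (2 ^ k) (List.replicate k false)
    let dp1 := (List.range k).foldl
      (fun dp v => dp.set (1 <<< v) ((dp.getD (1 <<< v) []).set v true)) dp0
    let full := 2 ^ k - 1
    let dp2 := (List.range' 1 full).foldl
      (fun dp mask => (List.range k).foldl (pvAVisit sub k mask) dp) dp1
    (List.range k).any (fun v =>
      (dp2.getD full []).getD v false && ((sub.getD v []).getD 0 0 != 0))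

-- ===== PORT B =====
-- B's `edge(i, j)`: i != j and bool(A[vlist[i]][vlist[j]])
def pvEdge (A : List (List Int)) (vlist : List Int) (u v : Nat) : Bool :=
  (u != v) && (pvRawEdge A vlist u v != 0)

-- B's recursive `extend(visited, last)`; the fuel argument only makes the recursion
-- structural (depth is bounded by k + 1, proved below) and never truncates it.
def pvExt (edge : Nat → Nat → Bool) (k full : Nat) : Nat → Nat → Nat → Bool
  | 0, _, _ => false
  | fuel + 1, visited, last =>
    if visited = full then edge last 0
    else (List.range k).any (fun u =>
      (!((visited >>> u) &&& 1 == 1)) &&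
        (edge last u && pvExt edge k full fuel (visited ||| (1 <<< u)) u))

def has_hamcycle_subtournament_alt (A : List (List Int)) (vertices : List Int) : Bool :=
  let k := vertices.length
  if k < 3 ∨ k % 2 = 0 then false
  else
    let full := 2 ^ k - 1
    (List.range k).any (fun v => pvExt (pvEdge A vertices) k full (k + 1) (1 <<< v) v)

-- ===== PRECONDITION & SPEC =====
-- Pre_ excludes exactly the inputs where Python A raises IndexError: once k ≥ 3 and k is odd,
-- A indexes A[vertices[i]][vertices[j]] for every pair of distinct positions i ≠ j.
def Pre_has_hamcycle_subtournament (A : List (List Int)) (vertices : List Int) : Prop :=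
  vertices.length < 3 ∨ vertices.length % 2 = 0 ∨
    ∀ i < vertices.length, ∀ j < vertices.length, i ≠ j →
      ((PySem.List.pyGet? A (vertices.getD i 0)).bind
        (fun row => PySem.List.pyGet? row (vertices.getD j 0))).isSome
instance (A : List (List Int)) (vertices : List Int) :
    Decidable (Pre_has_hamcycle_subtournament A vertices) := by
  unfold Pre_has_hamcycle_subtournament; infer_instance

def pvWitness_has_hamcycle_subtournament : List (List Int) × List Int :=
  ([[0, 1, 0], [0, 0, 1], [1, 0, 0]], [0, 1, 2])

def Spec_has_hamcycle_subtournament (A : List (List Int)) (vertices : List Int) (out : Bool) : Prop := out = has_hamcycle_subtournament_alt A vertices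
instance (A : List (List Int)) (vertices : List Int) (out : Bool) : Decidable (Spec_has_hamcycle_subtournament A vertices out) := by unfold Spec_has_hamcycle_subtournament; infer_instance

-- ===== CLAIM (what is proved, stated in full; the proofs are below) =====
def Claim_equal_has_hamcycle_subtournament : Prop := ∀ (A : List (List Int)) (vertices : List Int), Dom_has_hamcycle_subtournament A vertices → Pre_has_hamcycle_subtournament A vertices → Spec_has_hamcycle_subtournament A vertices (has_hamcycle_subtournament A vertices)

-- ===== LEMMAS AND PROOFS =====

-- specification: pvGP edge k mask v = "some path visits exactly `mask` and ends at v"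
def pvGP (edge : Nat → Nat → Bool) (k : Nat) (mask v : Nat) : Bool :=
  if h : mask.testBit v then
    if mask = 1 <<< v then true
    else (List.range k).any (fun u =>
      (mask ^^^ (1 <<< v)).testBit u && edge u v && pvGP edge k (mask ^^^ (1 <<< v)) u)
  else false
termination_by mask
decreasing_by
  rw [Nat.one_shiftLeft]
  apply Nat.lt_of_testBit v (by simp [Nat.testBit_xor, Nat.testBit_two_pow, h]) h
  intro j hj
  have huj : decide (v = j) = false := by simp; omega
  simp [Nat.testBit_xor, Nat.testBit_two_pow, huj]

-- generic bit-twiddling and list-update facts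
theorem pv_getD_set {α : Type} (xs : List α) (i j : Nat) (a d : α) :
    (xs.set i a).getD j d = if i = j ∧ j < xs.length then a else xs.getD j d := by
  simp [List.getD_eq_getElem?_getD, List.getElem?_set]
  split_ifs <;> simp_all

theorem pv_testBit_shift (u b : Nat) : (1 <<< u).testBit b = decide (u = b) := by
  simp [Nat.one_shiftLeft, Nat.testBit_two_pow]

theorem pv_testBit_or_shift (a u b : Nat) :
    (a ||| 1 <<< u).testBit b = (a.testBit b || decide (u = b)) := by
  simp only [Nat.testBit_or, pv_testBit_shift]

theorem pv_shift_lt {u k : Nat} (hu : u < k) : 1 <<< u < 2 ^ k := by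
  rw [Nat.one_shiftLeft]; exact Nat.pow_lt_pow_right (by omega) hu

theorem pv_xor_lt {x u : Nat} (h : x.testBit u = true) : x ^^^ (1 <<< u) < x := by
  rw [Nat.one_shiftLeft]
  apply Nat.lt_of_testBit u (by simp [Nat.testBit_xor, Nat.testBit_two_pow, h]) h
  intro j hj
  have huj : decide (u = j) = false := by simp; omega
  simp [Nat.testBit_xor, Nat.testBit_two_pow, huj]

theorem pv_xor_or {t u : Nat} (h : t.testBit u = true) : (t ^^^ 1 <<< u) ||| 1 <<< u = t := by
  apply Nat.eq_of_testBit_eq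
  intro j
  simp only [Nat.testBit_or, Nat.testBit_xor, pv_testBit_shift]
  by_cases hj : u = j
  · subst hj; simp [h]
  · simp [hj]

theorem pv_or_xor {m u : Nat} (h : m.testBit u = false) : (m ||| 1 <<< u) ^^^ (1 <<< u) = m := by
  apply Nat.eq_of_testBit_eq
  intro j
  simp only [Nat.testBit_xor, Nat.testBit_or, pv_testBit_shift]
  by_cases hj : u = j
  · subst hj; simp [h]
  · simp [hj]

theorem pv_rest_eq_iff {t u m : Nat} (h : t.testBit u = true) :
    t ^^^ 1 <<< u = m ↔ (m.testBit u = false ∧ t = m ||| 1 <<< u) := by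
  constructor
  · rintro rfl
    refine ⟨by simp [Nat.testBit_xor, pv_testBit_shift, h], (pv_xor_or h).symm⟩
  · rintro ⟨hm, rfl⟩
    exact pv_or_xor hm

theorem pv_xor_eq_zero_iff (t u : Nat) : t ^^^ 1 <<< u = 0 ↔ t = 1 <<< u :=
  ⟨Nat.eq_of_xor_eq_zero, fun h => by subst h; simp⟩

theorem pv_and_shift_eq_zero (m u : Nat) : (m &&& 1 <<< u == 0) = !m.testBit u := by
  cases h : m.testBit u with
  | false =>
    have : m &&& 1 <<< u = 0 := by
      apply Nat.eq_of_testBit_eq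
      intro j
      simp only [Nat.testBit_and, pv_testBit_shift, Nat.zero_testBit]
      by_cases hj : u = j
      · subst hj; simp [h]
      · simp [hj]
    simp [this]
  | true =>
    have hne : m &&& 1 <<< u ≠ 0 := by
      intro hz
      have hb : (m &&& 1 <<< u).testBit u = false := by simp [hz]
      rw [Nat.testBit_and, pv_testBit_shift, h] at hb
      simp at hb
    simp [hne]

theorem pv_or_self_ne {m u : Nat} (h : m.testBit u = false) : m ≠ m ||| 1 <<< u := by
  intro he
  have : (m ||| 1 <<< u).testBit u = true := by simp [pv_testBit_or_shift]
  rw [← he, h] at this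
  exact absurd this (by simp)

theorem pv_testBit_def (m n : Nat) : ((m >>> n &&& 1 == 1) : Bool) = m.testBit n := by
  simp [Nat.testBit]

-- dp-table machinery for port A
def pvDpAt (dp : List (List Bool)) (t u : Nat) : Bool := (dp.getD t []).getD u false

def pvWF (k : Nat) (dp : List (List Bool)) : Prop :=
  dp.length = 2 ^ k ∧ ∀ r ∈ dp, r.length = k

theorem pv_getD_replicate {α : Type} (n t : Nat) (a d : α) :
    (List.replicate n a).getD t d = if t < n then a else d := by
  rw [List.getD_eq_getElem?_getD, List.getElem?_replicate]
  split_ifs <;> simp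

theorem pv_row_len {k : Nat} {dp : List (List Bool)} (h : pvWF k dp) {t : Nat} (ht : t < 2 ^ k) :
    (dp.getD t []).length = k := by
  have hlen : t < dp.length := by rw [h.1]; exact ht
  have hm : dp.getD t [] ∈ dp := by
    rw [List.getD_eq_getElem?_getD, List.getElem?_eq_getElem hlen]
    simp [List.getElem_mem]
  exact h.2 _ hm

theorem pvWF_set {k : Nat} {dp : List (List Bool)} (h : pvWF k dp) {t u : Nat} (ht : t < 2 ^ k) :
    pvWF k (dp.set t ((dp.getD t []).set u true)) := by
  refine ⟨by simpa using h.1, fun r hr => ?_⟩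
  rcases List.mem_or_eq_of_mem_set hr with h' | h'
  · exact h.2 r h'
  · subst h'; simpa using pv_row_len h ht

theorem pvDpAt_set {k : Nat} {dp : List (List Bool)} (h : pvWF k dp) {t u : Nat}
    (ht : t < 2 ^ k) (hu : u < k) (t' u' : Nat) :
    pvDpAt (dp.set t ((dp.getD t []).set u true)) t' u'
      = if t' = t ∧ u' = u then true else pvDpAt dp t' u' := by
  have hlen : t < dp.length := by rw [h.1]; exact ht
  unfold pvDpAt
  rw [pv_getD_set]
  by_cases h1 : t = t'
  · subst h1
    rw [if_pos ⟨rfl, hlen⟩, pv_getD_set, pv_row_len h ht]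
    by_cases h2 : u = u'
    · subst h2
      rw [if_pos ⟨rfl, hu⟩, if_pos ⟨rfl, rfl⟩]
    · rw [if_neg (by tauto), if_neg (by tauto)]
  · rw [if_neg (by tauto), if_neg (by tauto)]

theorem pv_dp0 (k : Nat) :
    pvWF k (List.replicate (2 ^ k) (List.replicate k false)) ∧
    ∀ t u : Nat, pvDpAt (List.replicate (2 ^ k) (List.replicate k false)) t u = false := by
  refine ⟨⟨by simp, fun r hr => by simp_all [List.mem_replicate]⟩, fun t u => ?_⟩
  unfold pvDpAt
  rw [pv_getD_replicate]
  split_ifs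
  · rw [pv_getD_replicate]; split_ifs <;> rfl
  · simp

theorem pv_init_go {k : Nat} (L : List Nat) (hL : ∀ v ∈ L, v < k)
    {dp : List (List Bool)} (h : pvWF k dp) :
    pvWF k (L.foldl (fun dp v => dp.set (1 <<< v) ((dp.getD (1 <<< v) []).set v true)) dp) ∧
    ∀ t u : Nat,
      pvDpAt (L.foldl (fun dp v => dp.set (1 <<< v) ((dp.getD (1 <<< v) []).set v true)) dp) t u
        = (pvDpAt dp t u || (decide (u ∈ L) && decide (t = 1 <<< u))) := by
  induction L generalizing dp with
  | nil => simp [h]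
  | cons v L ih =>
    have hv : v < k := hL v (by simp)
    have hsh : 1 <<< v < 2 ^ k := pv_shift_lt hv
    simp only [List.foldl_cons]
    obtain ⟨hwf, heq⟩ := ih (fun x hx => hL x (by simp [hx])) (pvWF_set h hsh)
    refine ⟨hwf, fun t u => ?_⟩
    rw [heq, pvDpAt_set h hsh hv]
    simp only [List.mem_cons]
    split_ifs with hc
    · obtain ⟨rfl, rfl⟩ := hc
      simp
    · by_cases hu : u = v
      · subst hu
        have ht : decide (t = 1 <<< u) = false := by simp; tauto
        simp [ht]
      · simp [hu]

-- effect of A's innermost u-loop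
def pvCnd (sub : List (List Int)) (mask v u : Nat) : Bool :=
  (!mask.testBit u) && ((sub.getD v []).getD u 0 != 0)

theorem pv_innerU_go (sub : List (List Int)) {k : Nat} (mask v : Nat) (L : List Nat)
    (hL : ∀ u ∈ L, u < k) {dp : List (List Bool)} (h : pvWF k dp) (hm : mask < 2 ^ k) :
    pvWF k (L.foldl (pvAWrite sub mask v) dp) ∧
    ∀ t u' : Nat, pvDpAt (L.foldl (pvAWrite sub mask v) dp) t u'
      = (pvDpAt dp t u' ||
          ((decide (u' ∈ L) && decide (t = mask ||| 1 <<< u')) && pvCnd sub mask v u')) := by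
  induction L generalizing dp with
  | nil => simp [h]
  | cons u L ih =>
    have hu : u < k := hL u (by simp)
    simp only [List.foldl_cons]
    have h0 : (mask &&& 1 <<< u == 0) = !mask.testBit u := pv_and_shift_eq_zero mask u
    have h1 : ((mask &&& 1 <<< u != 0) : Bool) = mask.testBit u := by
      rw [bne, h0]; simp
    have hstep : pvAWrite sub mask v dp u =
        if pvCnd sub mask v u then
          dp.set (mask ||| 1 <<< u) ((dp.getD (mask ||| 1 <<< u) []).set u true)
        else dp := by
      unfold pvAWrite pvCnd
      rw [h1]
      cases hb : mask.testBit u <;> simp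
    rw [hstep]
    by_cases hc : pvCnd sub mask v u = true
    · rw [if_pos hc]
      have horlt : mask ||| 1 <<< u < 2 ^ k := Nat.or_lt_two_pow hm (pv_shift_lt hu)
      obtain ⟨hwf, heq⟩ := ih (fun x hx => hL x (by simp [hx])) (pvWF_set h horlt)
      refine ⟨hwf, fun t u' => ?_⟩
      rw [heq, pvDpAt_set h horlt hu]
      simp only [List.mem_cons]
      split_ifs with hif
      · obtain ⟨rfl, rfl⟩ := hif
        simp [hc]
      · by_cases hu' : u' = u
        · subst hu'
          have hne : decide (t = mask ||| 1 <<< u') = false := by simp; tauto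
          simp [hne]
        · simp [hu']
    · rw [if_neg hc]
      obtain ⟨hwf, heq⟩ := ih (fun x hx => hL x (by simp [hx])) h
      refine ⟨hwf, fun t u' => ?_⟩
      rw [heq]
      simp only [List.mem_cons]
      by_cases hu' : u' = u
      · subst hu'
        have hcf : pvCnd sub mask v u' = false := by simpa using hc
        simp [hcf]
      · simp [hu']

-- effect of A's v-loop at a fixed mask (the whole body of one mask iteration)
theorem pv_visit_go (sub : List (List Int)) {k : Nat} (mask : Nat) (L : List Nat)
    (hL : ∀ v ∈ L, v < k) {dp : List (List Bool)} (h : pvWF k dp) (hm : mask < 2 ^ k) :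
    pvWF k (L.foldl (pvAVisit sub k mask) dp) ∧
    (∀ v' : Nat, pvDpAt (L.foldl (pvAVisit sub k mask) dp) mask v' = pvDpAt dp mask v') ∧
    ∀ t u' : Nat, pvDpAt (L.foldl (pvAVisit sub k mask) dp) t u'
      = (pvDpAt dp t u' ||
          ((decide (u' < k) && decide (t = mask ||| 1 <<< u')) &&
            ((!mask.testBit u') &&
              L.any (fun v => pvDpAt dp mask v && ((sub.getD v []).getD u' 0 != 0))))) := by
  induction L generalizing dp with
  | nil => simp [h]
  | cons v L ih =>
    have hv : v < k := hL v (by simp)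
    simp only [List.foldl_cons]
    by_cases g : pvDpAt dp mask v = true
    · have hbody : pvAVisit sub k mask dp v = (List.range k).foldl (pvAWrite sub mask v) dp := by
        unfold pvAVisit
        have : (dp.getD mask []).getD v false = true := g
        rw [this]
        simp
      rw [hbody]
      obtain ⟨hwf1, heq1⟩ :=
        pv_innerU_go sub mask v (List.range k) (fun x hx => by simpa using hx) h hm
      have stab : ∀ v' : Nat,
          pvDpAt ((List.range k).foldl (pvAWrite sub mask v) dp) mask v' = pvDpAt dp mask v' := by
        intro v'
        rw [heq1]
        by_cases hbit : mask.testBit v' = true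
        · have : pvCnd sub mask v v' = false := by simp [pvCnd, hbit]
          simp [this]
        · have hne : decide (mask = mask ||| 1 <<< v') = false := by
            simp only [decide_eq_false_iff_not]
            exact pv_or_self_ne (by simpa using hbit)
          simp [hne]
      obtain ⟨hwf, hstab2, heq2⟩ := ih (fun x hx => hL x (by simp [hx])) hwf1 
      refine ⟨hwf, fun v' => by rw [hstab2, stab], fun t u' => ?_⟩
      rw [heq2, heq1]
      simp only [stab, List.any_cons, g, List.mem_range, pvCnd]
      generalize pvDpAt dp t u' = X
      generalize decide (u' < k) = B1
      generalize decide (t = mask ||| 1 <<< u') = B2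
      generalize (!mask.testBit u') = B3
      generalize ((sub.getD v []).getD u' 0 != 0) = B4
      generalize L.any (fun w => pvDpAt dp mask w && ((sub.getD w []).getD u' 0 != 0)) = B5
      revert X B1 B2 B3 B4 B5
      decide
    · have hbody : pvAVisit sub k mask dp v = dp := by
        unfold pvAVisit
        have : (dp.getD mask []).getD v false = false := by
          cases hg : pvDpAt dp mask v
          · exact hg
          · exact absurd hg g
        rw [this]
        simp
      rw [hbody]
      obtain ⟨hwf, hstab2, heq2⟩ := ih (fun x hx => hL x (by simp [hx])) h
      refine ⟨hwf, hstab2, fun t u' => ?_⟩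
      rw [heq2]
      have gf : pvDpAt dp mask v = false := by
        cases hg : pvDpAt dp mask v
        · rfl
        · exact absurd hg g
      simp [gf]

theorem pv_any_congr {L : List Nat} {f g : Nat → Bool} (h : ∀ x ∈ L, f x = g x) :
    L.any f = L.any g := by
  induction L with
  | nil => rfl
  | cons a L ih => simp [List.any_cons, h a (by simp), ih (fun x hx => h x (by simp [hx]))]

theorem pvGP_unfold (edge : Nat → Nat → Bool) (k mask v : Nat) :
    pvGP edge k mask v =
      if mask.testBit v then
        (if mask = 1 <<< v then true
         else (List.range k).any fun u =>
           (mask ^^^ 1 <<< v).testBit u && edge u v && pvGP edge k (mask ^^^ 1 <<< v) u)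
      else false := by
  rw [pvGP]
  by_cases hc : mask.testBit v = true <;> simp [hc]

theorem pvGP_testBit {edge : Nat → Nat → Bool} {k mask v : Nat}
    (h : pvGP edge k mask v = true) : mask.testBit v = true := by
  by_contra hc
  rw [pvGP_unfold, if_neg hc] at h
  exact absurd h (by simp)

-- the invariant value of A's table after the masks 1..m have been processed
def pvChar (edge : Nat → Nat → Bool) (k m t u : Nat) : Bool :=
  decide (t = 1 <<< u) ||
    (t.testBit u && ((t ^^^ 1 <<< u != 0) && (decide (t ^^^ 1 <<< u ≤ m) &&
      (List.range k).any (fun w => edge w u && pvGP edge k (t ^^^ 1 <<< u) w))))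

theorem pv_char_zero (edge : Nat → Nat → Bool) (k t u : Nat) :
    pvChar edge k 0 t u = decide (t = 1 <<< u) := by
  unfold pvChar
  by_cases h1 : t ^^^ 1 <<< u = 0
  · simp [h1]
  · have h2 : decide (t ^^^ 1 <<< u ≤ 0) = false := by
      simp only [Nat.le_zero, decide_eq_false_iff_not]
      exact h1
    simp only [h2, Bool.false_and, Bool.and_false, Bool.or_false]

theorem pv_char_eval (edge : Nat → Nat → Bool) (k M m v : Nat) (hm : m ≤ M + 1) :
    pvChar edge k M m v = pvGP edge k m v := by
  rw [pvGP_unfold]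
  unfold pvChar
  cases hb : m.testBit v with
  | false =>
    have h1 : decide (m = 1 <<< v) = false := by
      simp only [decide_eq_false_iff_not]
      intro he
      rw [he, pv_testBit_shift] at hb
      simp at hb
    simp [h1, hb]
  | true =>
    by_cases hs : m = 1 <<< v
    · simp [hs, pv_testBit_shift]
    · have hrest0 : ((m ^^^ 1 <<< v != 0) : Bool) = true := by
        rw [bne_iff_ne]
        intro h0
        exact hs ((pv_xor_eq_zero_iff m v).mp h0)
      have hle : decide (m ^^^ 1 <<< v ≤ M) = true := by
        simp only [decide_eq_true_eq]
        have := pv_xor_lt (x := m) (u := v) hb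
        omega
      have h1 : decide (m = 1 <<< v) = false := by simp [hs]
      simp only [h1, hb, hrest0, hle, if_neg hs, if_pos, Bool.false_or, Bool.true_and]
      apply pv_any_congr
      intro w _
      cases hg : pvGP edge k (m ^^^ 1 <<< v) w
      · simp [hg]
      · simp [hg, pvGP_testBit hg]

theorem pv_char_step (edge : Nat → Nat → Bool) (k m t u : Nat) (hm1 : 1 ≤ m) :
    pvChar edge k m t u = (pvChar edge k (m - 1) t u ||
      ((decide (t = m ||| 1 <<< u) && !m.testBit u) &&
        (List.range k).any (fun w => pvGP edge k m w && edge w u))) := by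
  unfold pvChar
  cases hb : t.testBit u with
  | false =>
    have hnew : (decide (t = m ||| 1 <<< u) && !m.testBit u) = false := by
      cases hmb : m.testBit u
      · simp only [Bool.not_false, Bool.and_true, decide_eq_false_iff_not]
        intro he
        rw [he, pv_testBit_or_shift] at hb
        simp at hb
      · simp
    simp [hb, hnew]
  | true =>
    by_cases hs : t = 1 <<< u
    · simp [hs]
    · have hrest0 : ((t ^^^ 1 <<< u != 0) : Bool) = true := by
        rw [bne_iff_ne]
        intro h0
        exact hs ((pv_xor_eq_zero_iff t u).mp h0)
      by_cases hr : t ^^^ 1 <<< u = m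
      · have hmb : m.testBit u = false := ((pv_rest_eq_iff hb).mp hr).1
        have hteq : decide (t = m ||| 1 <<< u) = true := by
          simp [((pv_rest_eq_iff hb).mp hr).2]
        have hle : decide (t ^^^ 1 <<< u ≤ m) = true := by simp [hr]
        have hle' : decide (t ^^^ 1 <<< u ≤ m - 1) = false := by
          simp only [decide_eq_false_iff_not]
          omega
        have hcomm : (List.range k).any (fun w => edge w u && pvGP edge k (t ^^^ 1 <<< u) w)
            = (List.range k).any (fun w => pvGP edge k m w && edge w u) := by
          apply pv_any_congr
          intro w _
          rw [hr, Bool.and_comm]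
        simp only [hb, hrest0, hle, hle', hteq, hmb, hcomm, Bool.true_and, Bool.and_false,
          Bool.false_and, Bool.and_true, Bool.or_false, Bool.not_false]
      · have hnew : (decide (t = m ||| 1 <<< u) && !m.testBit u) = false := by
          cases hmb : m.testBit u
          · simp only [Bool.not_false, Bool.and_true, decide_eq_false_iff_not]
            intro he
            exact hr ((pv_rest_eq_iff hb).mpr ⟨hmb, he⟩)
          · simp
        have hle : decide (t ^^^ 1 <<< u ≤ m) = decide (t ^^^ 1 <<< u ≤ m - 1) := by
          simp only [decide_eq_decide]
          omega
        simp [hnew, hle]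

theorem pvA_loop (sub : List (List Int)) (edge : Nat → Nat → Bool) {k : Nat}
    (hedge : ∀ v u, v < k → u < k → ((sub.getD v []).getD u 0 != 0) = edge v u)
    {dp1 : List (List Bool)} (h1 : pvWF k dp1)
    (hdp1 : ∀ t u, t < 2 ^ k → u < k → pvDpAt dp1 t u = decide (t = 1 <<< u)) :
    ∀ n, n ≤ 2 ^ k - 1 →
      pvWF k ((List.range' 1 n).foldl
        (fun dp mask => (List.range k).foldl (pvAVisit sub k mask) dp) dp1) ∧
      ∀ t u, t < 2 ^ k → u < k →
        pvDpAt ((List.range' 1 n).foldl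
          (fun dp mask => (List.range k).foldl (pvAVisit sub k mask) dp) dp1) t u
          = pvChar edge k n t u := by
  intro n
  induction n with
  | zero =>
    intro _
    exact ⟨h1, fun t u ht hu => by rw [pv_char_zero]; exact hdp1 t u ht hu⟩
  | succ n ih =>
    intro hn
    obtain ⟨hwf, heq⟩ := ih (by omega)
    have hconc : List.range' 1 (n + 1) 1 = List.range' 1 n 1 ++ [n + 1] := by
      rw [List.range'_concat]
      norm_num [Nat.add_comm]
    rw [hconc, List.foldl_append, List.foldl_cons, List.foldl_nil]
    have hmask : n + 1 < 2 ^ k := by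
      have h2 : (1:Nat) ≤ 2 ^ k := Nat.one_le_two_pow
      omega
    obtain ⟨hwf2, _, heq2⟩ :=
      pv_visit_go sub (n + 1) (List.range k) (fun x hx => by simpa using hx) hwf hmask
    refine ⟨hwf2, fun t u ht hu => ?_⟩
    rw [heq2, heq t u ht hu]
    have hany : (List.range k).any
          (fun v => pvDpAt ((List.range' 1 n).foldl
            (fun dp mask => (List.range k).foldl (pvAVisit sub k mask) dp) dp1) (n + 1) v &&
              ((sub.getD v []).getD u 0 != 0))
        = (List.range k).any (fun w => pvGP edge k (n + 1) w && edge w u) := by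
      apply pv_any_congr
      intro w hw
      have hwk : w < k := by simpa using hw
      rw [heq (n + 1) w hmask hwk, pv_char_eval edge k n (n + 1) w (by omega),
        hedge w u hwk hu]
    rw [hany, pv_char_step edge k (n + 1) t u (by omega)]
    have hud : decide (u < k) = true := by simp [hu]
    simp only [hud, Nat.add_sub_cancel, Bool.true_and]
    generalize pvChar edge k n t u = B1
    generalize decide (t = n + 1 ||| 1 <<< u) = B2
    generalize (!(n + 1).testBit u) = B3
    generalize (List.range k).any (fun w => pvGP edge k (n + 1) w && edge w u) = B4
    revert B1 B2 B3 B4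
    decide

theorem pvDpAt_def (dp : List (List Bool)) (t u : Nat) :
    (dp.getD t []).getD u false = pvDpAt dp t u := rfl

theorem pv_getD_map_range {α : Type} (f : Nat → α) (k v : Nat) (hv : v < k) (d : α) :
    ((List.range k).map f).getD v d = f v := by
  rw [List.getD_eq_getElem?_getD, List.getElem?_map, List.getElem?_range hv]
  rfl

theorem pv_sub_ne (A : List (List Int)) (vl : List Int) {k v u : Nat} (hv : v < k) (hu : u < k) :
    ((((pvSub A vl k).getD v []).getD u 0 != 0) : Bool) = pvEdge A vl v u := by
  unfold pvSub pvEdge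
  rw [pv_getD_map_range _ k v hv, pv_getD_map_range _ k u hu]
  by_cases he : v = u
  · subst he; simp
  · simp [he]

theorem pvA_result (A : List (List Int)) (vertices : List Int)
    (h3 : ¬ vertices.length < 3) (hodd : ¬ vertices.length % 2 = 0) :
    has_hamcycle_subtournament A vertices
      = (List.range vertices.length).any (fun v =>
          pvGP (pvEdge A vertices) vertices.length (2 ^ vertices.length - 1) v
            && pvEdge A vertices v 0) := by
  unfold has_hamcycle_subtournament
  simp only [if_neg h3, if_neg hodd]
  obtain ⟨hwf0, h0⟩ := pv_dp0 vertices.length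
  obtain ⟨hwf1, h1⟩ :=
    pv_init_go (k := vertices.length) (List.range vertices.length)
      (fun x hx => by simpa using hx) hwf0
  have hdp1 : ∀ t u, t < 2 ^ vertices.length → u < vertices.length →
      pvDpAt ((List.range vertices.length).foldl
        (fun dp v => dp.set (1 <<< v) ((dp.getD (1 <<< v) []).set v true))
        (List.replicate (2 ^ vertices.length) (List.replicate vertices.length false))) t u
        = decide (t = 1 <<< u) := by
    intro t u _ hu
    rw [h1, h0]
    simp [List.mem_range, hu]
  obtain ⟨hwfL, heqL⟩ :=
    pvA_loop (pvSub A vertices vertices.length) (pvEdge A vertices)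
      (fun v u hv hu => pv_sub_ne A vertices hv hu) hwf1 hdp1
      (2 ^ vertices.length - 1) (le_refl _)
  have h2k : (1:Nat) ≤ 2 ^ vertices.length := Nat.one_le_two_pow
  have hfull : 2 ^ vertices.length - 1 < 2 ^ vertices.length := by omega
  have h0k : 0 < vertices.length := by omega
  apply pv_any_congr
  intro v hv
  have hvk : v < vertices.length := by simpa using hv
  rw [pvDpAt_def, heqL (2 ^ vertices.length - 1) v hfull hvk,
    pv_char_eval _ _ _ _ _ (by omega),
    pv_sub_ne A vertices hvk h0k]

-- ===== the bridge between A's DP and B's backtracking: a common list-of-vertices spec =====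

def pvMaskOf (l : List Nat) : Nat := l.foldr (fun x m => m ||| 1 <<< x) 0

theorem pvMaskOf_testBit (l : List Nat) (b : Nat) :
    (pvMaskOf l).testBit b = decide (b ∈ l) := by
  induction l with
  | nil => simp [pvMaskOf]
  | cons x l ih =>
    simp only [pvMaskOf, List.foldr_cons] at *
    rw [pv_testBit_or_shift, ih]
    by_cases hb : b = x
    · subst hb; simp
    · by_cases hm : b ∈ l <;> simp [hb, hm, Ne.symm hb]

theorem pvMaskOf_concat (l : List Nat) (a : Nat) :
    pvMaskOf (l ++ [a]) = pvMaskOf l ||| 1 <<< a := by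
  apply Nat.eq_of_testBit_eq
  intro b
  rw [pv_testBit_or_shift, pvMaskOf_testBit, pvMaskOf_testBit]
  by_cases hb : b = a
  · subst hb; simp
  · by_cases hm : b ∈ l <;> simp [hb, hm, Ne.symm hb]

theorem pv_getLast?_cons (a : Nat) (l : List Nat) :
    (a :: l).getLast? = some (l.getLastD a) := by
  induction l generalizing a with
  | nil => rfl
  | cons b l ih => rw [List.getLastD_cons, ← ih b]; exact List.getLast?_cons_cons ..

-- "l is a directed path in the subgraph, all vertices below k"
def pvIsPath (edge : Nat → Nat → Bool) (k : Nat) (l : List Nat) : Prop :=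
  List.IsChain (fun a b => edge a b = true) l ∧ l.Nodup ∧ ∀ x ∈ l, x < k

-- A's DP entries characterised by paths
theorem pvGP_iff (edge : Nat → Nat → Bool) (k : Nat) :
    ∀ mask v, v < k →
      (pvGP edge k mask v = true ↔
        ∃ l, pvIsPath edge k l ∧ l.getLast? = some v ∧ pvMaskOf l = mask) := by
  intro mask
  induction mask using Nat.strong_induction_on with
  | _ mask ih =>
  intro v hv
  constructor
  · intro h
    rw [pvGP_unfold] at h
    by_cases hb : mask.testBit v
    swap
    · rw [if_neg hb] at h; exact absurd h (by simp)
    rw [if_pos hb] at h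
    by_cases hs : mask = 1 <<< v
    · refine ⟨[v], ⟨List.isChain_singleton v, by simp, by simpa⟩, by simp, ?_⟩
      simp [pvMaskOf, hs]
    · rw [if_neg hs, List.any_eq_true] at h
      obtain ⟨u, humem, hconj⟩ := h
      have huk : u < k := by simpa using humem
      rw [Bool.and_eq_true, Bool.and_eq_true] at hconj
      obtain ⟨⟨hbu, he⟩, hg⟩ := hconj
      obtain ⟨l', ⟨hch, hnd, hlt⟩, hlast, hmask⟩ :=
        (ih (mask ^^^ 1 <<< v) (pv_xor_lt hb) u huk).mp hg
      have hvnot : v ∉ l' := by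
        intro hmem
        have hbit : (mask ^^^ 1 <<< v).testBit v = false := by
          simp [Nat.testBit_xor, pv_testBit_shift, hb]
        rw [← hmask, pvMaskOf_testBit] at hbit
        simp [hmem] at hbit
      refine ⟨l' ++ [v], ⟨?_, ?_, ?_⟩, List.getLast?_concat .., ?_⟩
      · rw [List.isChain_append]
        refine ⟨hch, List.isChain_singleton v, ?_⟩
        intro x hx y hy
        rw [hlast] at hx
        simp only [Option.mem_def, Option.some.injEq, List.head?_cons] at hx hy
        subst hx; subst hy
        exact he
      · rw [List.nodup_append]
        exact ⟨hnd, by simp, fun a ha b hb => by simp at hb; subst hb; exact fun h => hvnot (h ▸ ha)⟩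
      · intro x hx
        rcases List.mem_append.mp hx with hx | hx
        · exact hlt x hx
        · simp at hx; subst hx; exact hv
      · rw [pvMaskOf_concat, hmask, pv_xor_or hb]
  · rintro ⟨l, ⟨hch, hnd, hlt⟩, hlast, hmask⟩
    have hne : l ≠ [] := by rintro rfl; simp at hlast
    have hlasteq : l.getLast hne = v := by
      rw [List.getLast?_eq_some_getLast hne] at hlast
      exact Option.some.inj hlast
    have hdecomp : l.dropLast ++ [v] = l := by
      rw [← hlasteq]; exact List.dropLast_concat_getLast hne
    have hmask2 : pvMaskOf l.dropLast ||| 1 <<< v = mask := by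
      rw [← pvMaskOf_concat, hdecomp, hmask]
    have hvnot : v ∉ l.dropLast := by
      rw [← hdecomp] at hnd
      rw [List.nodup_append] at hnd
      intro hmem
      exact hnd.2.2 v hmem v (by simp) rfl
    have hbv : mask.testBit v = true := by
      rw [← hmask2, pv_testBit_or_shift]; simp
    have hsub : mask ^^^ 1 <<< v = pvMaskOf l.dropLast := by
      rw [← hmask2, pv_or_xor]
      rw [pvMaskOf_testBit]
      simpa using hvnot
    rw [pvGP_unfold, if_pos hbv]
    by_cases hl2 : l.dropLast = []
    · have : mask = 1 <<< v := by rw [← hmask2, hl2]; simp [pvMaskOf]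
      simp [this]
    · have hu_mem : l.dropLast.getLast hl2 ∈ l.dropLast := List.getLast_mem hl2
      have hu_k : l.dropLast.getLast hl2 < k :=
        hlt _ ((List.dropLast_sublist l).subset hu_mem)
      have hmaskne : mask ≠ 1 <<< v := by
        intro heq
        have h0 : pvMaskOf l.dropLast = 0 := by rw [← hsub, heq]; simp
        have := pvMaskOf_testBit l.dropLast (l.dropLast.getLast hl2)
        rw [h0] at this
        simp [hu_mem] at this
      rw [if_neg hmaskne, List.any_eq_true]
      refine ⟨l.dropLast.getLast hl2, List.mem_range.mpr hu_k, ?_⟩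
      rw [Bool.and_eq_true, Bool.and_eq_true]
      refine ⟨⟨?_, ?_⟩, ?_⟩
      · rw [hsub, pvMaskOf_testBit]; simpa using hu_mem
      · rw [← hdecomp, List.isChain_append] at hch
        exact hch.2.2 _ (by rw [List.getLast?_eq_some_getLast hl2]; rfl) v (by rfl)
      · refine (ih (mask ^^^ 1 <<< v) (pv_xor_lt hbv) _ hu_k).mpr
          ⟨l.dropLast, ⟨?_, ?_, ?_⟩, List.getLast?_eq_some_getLast hl2, hsub.symm⟩
        · rw [← hdecomp] at hch; exact hch.left_of_append
        · exact hnd.sublist (List.dropLast_sublist l)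
        · exact fun x hx => hlt x ((List.dropLast_sublist l).subset hx)

-- one backtracking step marks one more vertex as visited
theorem pv_filter_card_or {k u visited : Nat} (hu : u < k) (hb : visited.testBit u = false) :
    ((Finset.range k).filter (fun i => ((visited ||| 1 <<< u).testBit i : Prop))).card
      = ((Finset.range k).filter (fun i => (visited.testBit i : Prop))).card + 1 := by
  have hset : (Finset.range k).filter (fun i => ((visited ||| 1 <<< u).testBit i : Prop))
      = insert u ((Finset.range k).filter (fun i => (visited.testBit i : Prop))) := by
    ext i
    simp only [Finset.mem_filter, Finset.mem_insert, Finset.mem_range, pv_testBit_or_shift,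
      Bool.or_eq_true, decide_eq_true_eq]
    constructor
    · rintro ⟨hik, hor | hor⟩
      · exact Or.inr ⟨hik, hor⟩
      · exact Or.inl hor.symm
    · rintro (rfl | ⟨hik, hbit⟩)
      · exact ⟨hu, Or.inr rfl⟩
      · exact ⟨hik, Or.inl hbit⟩
  rw [hset, Finset.card_insert_of_notMem (by simp [Finset.mem_filter, hb])]

-- B's recursion characterised by path extensions (fuel is never exhausted)
theorem pvExt_iff (edge : Nat → Nat → Bool) (k : Nat) :
    ∀ fuel visited last,
      ((Finset.range k).filter (fun i => (visited.testBit i : Prop))).card + fuel ≥ k + 1 →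
      (pvExt edge k (2 ^ k - 1) fuel visited last = true ↔
        ∃ l, List.IsChain (fun a b => edge a b = true) (last :: l) ∧ l.Nodup ∧
          (∀ x ∈ l, x < k ∧ visited.testBit x = false) ∧
          visited ||| pvMaskOf l = 2 ^ k - 1 ∧
          edge (l.getLastD last) 0 = true) := by
  intro fuel
  induction fuel with
  | zero =>
    intro visited last hcond
    exfalso
    have h1 := Finset.card_filter_le (Finset.range k) (fun i => (visited.testBit i : Prop))
    rw [Finset.card_range] at h1
    omega
  | succ fuel ih =>
    intro visited last hcond
    by_cases hvf : visited = 2 ^ k - 1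
    · rw [pvExt, if_pos hvf]
      constructor
      · intro he
        exact ⟨[], List.isChain_singleton last, by simp, by simp, by simp [pvMaskOf, hvf], by simpa⟩
      · rintro ⟨l, _, _, hall, _, hedge⟩
        cases l with
        | nil => simpa using hedge
        | cons x l' =>
          have hx := hall x (by simp)
          rw [hvf, Nat.testBit_two_pow_sub_one] at hx
          simp [hx.1] at hx
    · rw [pvExt, if_neg hvf, List.any_eq_true]
      constructor
      · rintro ⟨u, humem, hconj⟩
        have huk : u < k := by simpa using humem
        rw [Bool.and_eq_true, Bool.and_eq_true] at hconj
        obtain ⟨hbit, he, hrec⟩ := hconj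
        rw [Bool.not_eq_eq_eq_not, Bool.not_true, pv_testBit_def] at hbit
        have hrec' := (ih (visited ||| 1 <<< u) u
          (by rw [pv_filter_card_or huk hbit]; omega)).mp hrec
        obtain ⟨l', hch, hnd, hall, hun, hedge⟩ := hrec'
        refine ⟨u :: l', List.isChain_cons_cons.mpr ⟨he, hch⟩, ?_, ?_, ?_, ?_⟩
        · refine List.nodup_cons.mpr ⟨?_, hnd⟩
          intro hmem
          have := (hall u hmem).2
          rw [pv_testBit_or_shift] at this
          simp at this
        · intro x hx
          rcases List.mem_cons.mp hx with rfl | hx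
          · exact ⟨huk, hbit⟩
          · obtain ⟨hxk, hxb⟩ := hall x (by simpa using hx)
            rw [pv_testBit_or_shift, Bool.or_eq_false_iff] at hxb
            exact ⟨hxk, hxb.1⟩
        · show visited ||| (pvMaskOf l' ||| 1 <<< u) = 2 ^ k - 1
          rw [Nat.or_comm (pvMaskOf l'), ← Nat.or_assoc]
          exact hun
        · rw [List.getLastD_cons]
          exact hedge
      · rintro ⟨l, hch, hnd, hall, hun, hedge⟩
        have hlne : l ≠ [] := by
          rintro rfl
          simp only [pvMaskOf, List.foldr_nil, Nat.or_zero] at hun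
          exact hvf hun
        obtain ⟨u, l', rfl⟩ := List.exists_cons_of_ne_nil hlne
        obtain ⟨huk, hbu⟩ := hall u (by simp)
        refine ⟨u, List.mem_range.mpr huk, ?_⟩
        rw [Bool.and_eq_true, Bool.and_eq_true]
        refine ⟨?_, (List.isChain_cons_cons.mp hch).1, ?_⟩
        · rw [Bool.not_eq_eq_eq_not, Bool.not_true, pv_testBit_def]
          exact hbu
        · refine (ih (visited ||| 1 <<< u) u
            (by rw [pv_filter_card_or huk hbu]; omega)).mpr
            ⟨l', (List.isChain_cons_cons.mp hch).2, hnd.of_cons, ?_, ?_, ?_⟩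
          · intro x hx
            obtain ⟨hxk, hxb⟩ := hall x (by simp [hx])
            refine ⟨hxk, ?_⟩
            rw [pv_testBit_or_shift, hxb]
            have : u ≠ x := fun h => (List.nodup_cons.mp hnd).1 (h ▸ hx)
            simp [this]
          · rw [Nat.or_assoc, Nat.or_comm (1 <<< u)]
            exact hun
          · rw [List.getLastD_cons] at hedge
            exact hedge

-- the two existence checks agree: head-anchored extensions vs end-anchored DP paths
theorem pv_bridge (edge : Nat → Nat → Bool) (k : Nat) :
    (List.range k).any (fun v => pvExt edge k (2 ^ k - 1) (k + 1) (1 <<< v) v)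
      = (List.range k).any (fun v => pvGP edge k (2 ^ k - 1) v && edge v 0) := by
  rw [Bool.eq_iff_iff, List.any_eq_true, List.any_eq_true]
  constructor
  · rintro ⟨v, hvmem, hext⟩
    have hvk : v < k := by simpa using hvmem
    obtain ⟨l, hch, hnd, hall, hun, hedge⟩ :=
      (pvExt_iff edge k (k + 1) (1 <<< v) v (by omega)).mp hext
    have hvnot : v ∉ l := by
      intro hmem
      have := (hall v hmem).2
      rw [pv_testBit_shift] at this
      simp at this
    have hek : l.getLastD v < k := by
      rcases (List.mem_cons.mp (List.getLastD_mem_cons (l := l) (a := v))) with he | he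
      · rw [he]; exact hvk
      · exact (hall _ he).1
    refine ⟨l.getLastD v, List.mem_range.mpr hek, ?_⟩
    rw [Bool.and_eq_true]
    refine ⟨(pvGP_iff edge k (2 ^ k - 1) _ hek).mpr ⟨v :: l, ⟨hch, ?_, ?_⟩, ?_, ?_⟩, hedge⟩
    · exact List.nodup_cons.mpr ⟨hvnot, hnd⟩
    · intro x hx
      rcases List.mem_cons.mp hx with rfl | hx
      · exact hvk
      · exact (hall x (by simpa using hx)).1
    · exact pv_getLast?_cons v l
    · show pvMaskOf l ||| 1 <<< v = 2 ^ k - 1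
      rw [Nat.or_comm]
      exact hun
  · rintro ⟨w, hwmem, hconj⟩
    have hwk : w < k := by simpa using hwmem
    rw [Bool.and_eq_true] at hconj
    obtain ⟨hgp, hedge⟩ := hconj
    obtain ⟨m, ⟨hch, hnd, hlt⟩, hlast, hmask⟩ := (pvGP_iff edge k (2 ^ k - 1) w hwk).mp hgp
    have hmne : m ≠ [] := by rintro rfl; simp at hlast
    obtain ⟨v, l, rfl⟩ := List.exists_cons_of_ne_nil hmne
    have hvk : v < k := hlt v (by simp)
    refine ⟨v, List.mem_range.mpr hvk, ?_⟩
    refine (pvExt_iff edge k (k + 1) (1 <<< v) v (by omega)).mpr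
      ⟨l, hch, hnd.of_cons, ?_, ?_, ?_⟩
    · intro x hx
      refine ⟨hlt x (by simp [hx]), ?_⟩
      rw [pv_testBit_shift]
      have : v ≠ x := fun h => (List.nodup_cons.mp hnd).1 (h ▸ hx)
      simp [this]
    · show 1 <<< v ||| pvMaskOf l = 2 ^ k - 1
      rw [Nat.or_comm]
      exact hmask
    · rw [pv_getLast?_cons] at hlast
      rw [Option.some.inj hlast]
      exact hedge

theorem pvB_result (A : List (List Int)) (vertices : List Int)
    (h3 : ¬ vertices.length < 3) (hodd : ¬ vertices.length % 2 = 0) :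
    has_hamcycle_subtournament_alt A vertices
      = (List.range vertices.length).any (fun v =>
          pvGP (pvEdge A vertices) vertices.length (2 ^ vertices.length - 1) v
            && pvEdge A vertices v 0) := by
  unfold has_hamcycle_subtournament_alt
  rw [if_neg (by tauto : ¬ (vertices.length < 3 ∨ vertices.length % 2 = 0))]
  exact pv_bridge (pvEdge A vertices) vertices.length

-- ===== VERDICT (by name: the statement is the Claim_ definition above) =====
theorem has_hamcycle_subtournament_spec : Claim_equal_has_hamcycle_subtournament := by
  intro A vertices _ _
  unfold Spec_has_hamcycle_subtournament
  by_cases h3 : vertices.length < 3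
  · simp [has_hamcycle_subtournament, has_hamcycle_subtournament_alt, h3]
  · by_cases hodd : vertices.length % 2 = 0
    · simp [has_hamcycle_subtournament, has_hamcycle_subtournament_alt, h3, hodd]
    · rw [pvA_result A vertices h3 hodd, pvB_result A vertices h3 hodd]
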